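-- pv_equiv track=rewrite | github.com/novac42/chrome-update-digest | src/merge_webgpu_release_notes_v2.py | extract_webgpu_features
-- ===== SOURCE A (Python) =====
-- from typing import List, Optional
--
-- def extract_webgpu_features(webgpu_content: str) -> List[str]:
--     """
--     Extract only the actual WebGPU feature sections from the WebGPU release notes.
--     Standalone function version for import.
--
--     Returns:
--         List of feature sections as strings
--     """
--     lines = webgpu_content.split('\n')
--     features = []
--     current_feature = []
--     in_feature = False
--     skip_sections = ['What\'s New in WebGPU', 'WebGPU 139 Release Notes', 'WebGPU 138 Release Notes', 'WebGPU 137 Release Notes']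
--
--     for line in lines:
--         # Check if this is a H2 header
--         if line.startswith('## '):
--             # Check if we should skip this section
--             if any(skip in line for skip in skip_sections):
--                 in_feature = False
--                 current_feature = []
--                 continue
--
--             # Save previous feature if exists
--             if current_feature and in_feature:
--                 features.append('\n'.join(current_feature))
--
--             # Start new feature
--             current_feature = ['### ' + line[3:]]  # Convert H2 to H3
--             in_feature = True
--
--         # Check for H3 headers (demote to H4)
--         elif line.startswith('### ') and in_feature:
--             current_feature.append('#### ' + line[4:])
--
--         # Add content if we're in a feature section
--         elif in_feature:
--             current_feature.append(line)
--
--     # Don't forget the last feature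
--     if current_feature and in_feature:
--         features.append('\n'.join(current_feature))
--
--     # Filter out empty or whitespace-only features
--     features = [f.strip() for f in features if f.strip()]
--
--     return features
-- ===== SOURCE B (Python) =====
-- from typing import List
--
-- _SKIP = ['What\'s New in WebGPU', 'WebGPU 139 Release Notes', 'WebGPU 138 Release Notes', 'WebGPU 137 Release Notes']
--
--
-- def _group(lines):
--     """Split lines into (header, body_lines) segments at '## ' headers,
--     dropping any lines before the first header."""
--     segments = []
--     i, n = 0, len(lines)
--     while i < n:
--         line = lines[i]
--         i += 1
--         if line.startswith('## '):
--             body = []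
--             while i < n and not lines[i].startswith('## '):
--                 body.append(lines[i])
--                 i += 1
--             segments.append((line, body))
--     return segments
--
--
-- def _demote(line):
--     return '#### ' + line[4:] if line.startswith('### ') else line
--
--
-- def extract_webgpu_features(webgpu_content: str) -> List[str]:
--     sections = []
--     for header, body in _group(webgpu_content.split('\n')):
--         if any(skip in header for skip in _SKIP):
--             continue
--         sections.append('\n'.join(['### ' + header[3:]] + [_demote(l) for l in body]))
--     return [t for t in (s.strip() for s in sections) if t]
-- ===== Notes on version B (the rewrite author's own statement) =====
-- stated objective: alternative
-- what changed: Replaces A's single interleaved stateful scan (in_feature flag, pending buffer, flush-on-next-header) by a group-then-map decomposition: first split the lines into (header, body) segments at '## ' headers, then independently transform or skip each segment.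
-- intended difference: On inputs where a kept '## ' header is later followed by a skip-listed '## ' header, A silently discards the pending feature section accumulated so far (returning a list missing that section), while B keeps it; a section should not be lost just because the next header is a skip-listed one, so B's value is the intended one. — e.g. on extract_webgpu_features("## A\n## What's New in WebGPU"): A returns [], B returns ["### A"]
import Mathlib
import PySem

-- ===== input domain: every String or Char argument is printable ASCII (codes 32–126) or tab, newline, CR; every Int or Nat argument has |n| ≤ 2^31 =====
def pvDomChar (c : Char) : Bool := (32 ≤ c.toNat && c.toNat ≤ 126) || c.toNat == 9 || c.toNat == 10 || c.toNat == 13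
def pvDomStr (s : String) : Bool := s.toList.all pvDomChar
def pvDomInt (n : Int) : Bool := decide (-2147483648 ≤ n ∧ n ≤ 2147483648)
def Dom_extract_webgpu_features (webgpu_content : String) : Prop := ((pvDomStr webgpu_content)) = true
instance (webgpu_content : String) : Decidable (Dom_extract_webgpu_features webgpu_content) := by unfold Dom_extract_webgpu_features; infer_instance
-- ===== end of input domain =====

-- B replaces A's single interleaved stateful scan by a group-into-(header,body)-segments pass followed by an
-- independent per-segment transform (objective: alternative decomposition, not faster).

def pvSkips : List (List Char) :=
  ["What's New in WebGPU".toList, "WebGPU 139 Release Notes".toList,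
   "WebGPU 138 Release Notes".toList, "WebGPU 137 Release Notes".toList]

-- ===== PORT A =====
-- the body of A's for-loop, on state (features, current_feature, in_feature)
def pvStepA (st : List (List Char) × List (List Char) × Bool) (line : List Char) :
    List (List Char) × List (List Char) × Bool :=
  if PySem.Chars.startswith line "## ".toList then
    if pvSkips.any (fun skip => PySem.Chars.isIn skip line) then (st.1, [], false)
    else ((if !st.2.1.isEmpty && st.2.2 then st.1 ++ [PySem.Chars.join "\n".toList st.2.1] else st.1),
          ["### ".toList ++ PySem.Chars.slice line (some 3) none], true)
  else if PySem.Chars.startswith line "### ".toList && st.2.2 then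
    (st.1, st.2.1 ++ ["#### ".toList ++ PySem.Chars.slice line (some 4) none], st.2.2)
  else if st.2.2 then (st.1, st.2.1 ++ [line], st.2.2)
  else st

def extract_webgpu_features (webgpu_content : String) : List String :=
  let lines := PySem.Chars.splitOn webgpu_content.toList "\n".toList
  let st := lines.foldl pvStepA ([], [], false)
  let features := if !st.2.1.isEmpty && st.2.2 then st.1 ++ [PySem.Chars.join "\n".toList st.2.1] else st.1
  (features.filterMap (fun f =>
    if (PySem.Chars.strip f).isEmpty then none else some (PySem.Chars.strip f))).map String.ofList

-- ===== PORT B =====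
def pvNotHdr (s : List Char) : Bool := !PySem.Chars.startswith s "## ".toList

def pvDemote (line : List Char) : List Char :=
  if PySem.Chars.startswith line "### ".toList then "#### ".toList ++ PySem.Chars.slice line (some 4) none
  else line

-- group the lines into (header, body) segments at '## ' headers (lines before the first header dropped)
def pvGroupF : Nat → List (List Char) → List (List Char × List (List Char))
  | 0, _ => []
  | _ + 1, [] => []
  | n + 1, l :: ls =>
    if PySem.Chars.startswith l "## ".toList then
      (l, ls.takeWhile pvNotHdr) :: pvGroupF n (ls.dropWhile pvNotHdr)
    else pvGroupF n ls

def pvGroup (lines : List (List Char)) : List (List Char × List (List Char)) :=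
  pvGroupF lines.length lines

def pvSec (h : List Char) (b : List (List Char)) : List Char :=
  PySem.Chars.join "\n".toList (("### ".toList ++ PySem.Chars.slice h (some 3) none) :: b.map pvDemote)

def pvSections (lines : List (List Char)) : List (List Char) :=
  (pvGroup lines).filterMap (fun p =>
    if pvSkips.any (fun skip => PySem.Chars.isIn skip p.1) then none else some (pvSec p.1 p.2))

def extract_webgpu_features_alt (webgpu_content : String) : List String :=
  let sections := pvSections (PySem.Chars.splitOn webgpu_content.toList "\n".toList)
  (sections.filterMap (fun s =>
    if (PySem.Chars.strip s).isEmpty then none else some (PySem.Chars.strip s))).map String.ofList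

-- ===== PRECONDITION & SPEC =====
-- On inputs where a kept '## ' header line is later followed by a skip-listed '## ' header line, A silently
-- discards the pending feature section (its result misses that section) while B keeps it; B's value is the
-- intended one.  D_ is stated directly as a closed-form condition on the lines of the input: some line j
-- starts with '## ' and contains one of the four skip strings, and some earlier line i starts with '## '
-- and contains none of them.
def D_extract_webgpu_features (webgpu_content : String) : Prop :=
  let ls := PySem.Chars.splitOn webgpu_content.toList "\n".toList
  let skp := fun l : List Char => ∃ s ∈ ["What's New in WebGPU", "WebGPU 139 Release Notes",
    "WebGPU 138 Release Notes", "WebGPU 137 Release Notes"], s.toList <:+: l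
  ∃ j, j < ls.length ∧ "## ".toList <+: ls.getD j [] ∧ skp (ls.getD j []) ∧
    ∃ i, i < j ∧ "## ".toList <+: ls.getD i [] ∧ ¬ skp (ls.getD i [])
instance (webgpu_content : String) : Decidable (D_extract_webgpu_features webgpu_content) := by
  unfold D_extract_webgpu_features; infer_instance

def Spec_extract_webgpu_features (webgpu_content : String) (out : List String) : Prop :=
  ¬ D_extract_webgpu_features webgpu_content → out = extract_webgpu_features_alt webgpu_content
instance (webgpu_content : String) (out : List String) : Decidable (Spec_extract_webgpu_features webgpu_content out) := by
  unfold Spec_extract_webgpu_features; infer_instance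

def pvDiffWitness_extract_webgpu_features : String := "## A\n## What's New in WebGPU"
def pvDiffWitnessOut_extract_webgpu_features : (List String) × (List String) := ([], ["### A"])

-- ===== CLAIM =====
def Claim_unchanged_extract_webgpu_features : Prop := ∀ (webgpu_content : String), Dom_extract_webgpu_features webgpu_content → Spec_extract_webgpu_features webgpu_content (extract_webgpu_features webgpu_content)
def Claim_changed_extract_webgpu_features : Prop := Dom_extract_webgpu_features (pvDiffWitness_extract_webgpu_features) ∧ D_extract_webgpu_features (pvDiffWitness_extract_webgpu_features) ∧ extract_webgpu_features (pvDiffWitness_extract_webgpu_features) = pvDiffWitnessOut_extract_webgpu_features.1 ∧ extract_webgpu_features_alt (pvDiffWitness_extract_webgpu_features) = pvDiffWitnessOut_extract_webgpu_features.2 ∧ pvDiffWitnessOut_extract_webgpu_features.1 ≠ pvDiffWitnessOut_extract_webgpu_features.2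
def Claim_exact_extract_webgpu_features : Prop := ∀ (webgpu_content : String), Dom_extract_webgpu_features webgpu_content → D_extract_webgpu_features webgpu_content → extract_webgpu_features webgpu_content ≠ extract_webgpu_features_alt webgpu_content

-- ===== LEMMAS AND PROOFS =====

-- A's loop, rephrased as a recursion over the lines with the pending section as an Option (proof-side only)
def pvRunA : Option (List (List Char)) → List (List Char) → List (List Char)
  | none, [] => []
  | some c, [] => [PySem.Chars.join "\n".toList c]
  | p, l :: ls =>
    if PySem.Chars.startswith l "## ".toList then
      if pvSkips.any (fun skip => PySem.Chars.isIn skip l) then pvRunA none ls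
      else (match p with | none => [] | some c => [PySem.Chars.join "\n".toList c]) ++
           pvRunA (some ["### ".toList ++ PySem.Chars.slice l (some 3) none]) ls
    else match p with
      | some c => pvRunA (some (c ++ [pvDemote l])) ls
      | none => pvRunA none ls

def pvFinal (st : List (List Char) × List (List Char) × Bool) : List (List Char) :=
  if !st.2.1.isEmpty && st.2.2 then st.1 ++ [PySem.Chars.join "\n".toList st.2.1] else st.1

def pvIsSkipHdr (l : List Char) : Bool :=
  PySem.Chars.startswith l "## ".toList && (pvSkips.any (fun skip => PySem.Chars.isIn skip l))

def pvIsKeptHdr (l : List Char) : Bool :=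
  PySem.Chars.startswith l "## ".toList && !(pvSkips.any (fun skip => PySem.Chars.isIn skip l))

-- true iff no skip-listed '## ' header occurs after a kept '## ' header
def pvOk : List (List Char) → Bool
  | [] => true
  | l :: ls => if pvIsKeptHdr l then ls.all (fun x => !pvIsSkipHdr x) else pvOk ls

lemma pvIsKeptHdr_eq (l : List Char) : pvIsKeptHdr l =
    (PySem.Chars.startswith l "## ".toList && !(pvSkips.any (fun skip => PySem.Chars.isIn skip l))) := rfl

lemma pvIsSkipHdr_eq (l : List Char) : pvIsSkipHdr l =
    (PySem.Chars.startswith l "## ".toList && (pvSkips.any (fun skip => PySem.Chars.isIn skip l))) := rfl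

lemma pvSkpIff (l : List Char) :
    (∃ s ∈ (["What's New in WebGPU", "WebGPU 139 Release Notes",
      "WebGPU 138 Release Notes", "WebGPU 137 Release Notes"] : List String), s.toList <:+: l) ↔
    (pvSkips.any (fun skip => PySem.Chars.isIn skip l)) = true := by
  simp [pvSkips, PySem.Chars.isIn_iff_infix]

lemma pvSkipPropIff (x : List Char) :
    ("## ".toList <+: x ∧ ∃ s ∈ (["What's New in WebGPU", "WebGPU 139 Release Notes",
      "WebGPU 138 Release Notes", "WebGPU 137 Release Notes"] : List String), s.toList <:+: x) ↔
    pvIsSkipHdr x = true := by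
  rw [pvIsSkipHdr_eq, Bool.and_eq_true, ← PySem.Chars.startswith_iff, pvSkpIff]

lemma pvKeptPropIff (x : List Char) :
    ("## ".toList <+: x ∧ ¬ ∃ s ∈ (["What's New in WebGPU", "WebGPU 139 Release Notes",
      "WebGPU 138 Release Notes", "WebGPU 137 Release Notes"] : List String), s.toList <:+: x) ↔
    pvIsKeptHdr x = true := by
  rw [pvIsKeptHdr_eq, Bool.and_eq_true, ← PySem.Chars.startswith_iff]
  constructor
  · rintro ⟨h1, h2⟩
    exact ⟨h1, by rw [Bool.not_eq_true', ← Bool.not_eq_true]; exact fun hc => h2 ((pvSkpIff x).mpr hc)⟩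
  · rintro ⟨h1, h2⟩
    refine ⟨h1, fun hc => ?_⟩
    have := (pvSkpIff x).mp hc
    simp [this] at h2

lemma pvAll_false_iff (ls : List (List Char)) :
    ls.all (fun x => !pvIsSkipHdr x) = false ↔
      ∃ j, j < ls.length ∧ pvIsSkipHdr (ls.getD j []) = true := by
  constructor
  · intro h
    rw [← Bool.not_eq_true, List.all_eq_true] at h
    push_neg at h
    obtain ⟨x, hx, hpx⟩ := h
    obtain ⟨j, hj, hget⟩ := List.mem_iff_getElem.mp hx
    refine ⟨j, hj, ?_⟩
    rw [List.getD_eq_getElem ls [] hj, hget]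
    simpa using hpx
  · rintro ⟨j, hj, hsk⟩
    rw [← Bool.not_eq_true, List.all_eq_true]
    push_neg
    refine ⟨ls.getD j [], ?_, by intro hcon; rw [List.getD_eq_getElem?_getD] at hsk; simp [hsk] at hcon⟩
    rw [List.getD_eq_getElem ls [] hj]
    exact List.getElem_mem hj

lemma pvOk_false_iff : ∀ (xs : List (List Char)),
    pvOk xs = false ↔
      ∃ j, j < xs.length ∧ pvIsSkipHdr (xs.getD j []) = true ∧
        ∃ i, i < j ∧ pvIsKeptHdr (xs.getD i []) = true := by
  intro xs
  induction xs with
  | nil => simp [pvOk]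
  | cons l ls IH =>
    by_cases hk : pvIsKeptHdr l = true
    · have hskl : pvIsSkipHdr l = false := by
        rw [pvIsKeptHdr_eq, Bool.and_eq_true] at hk
        simp only [pvIsSkipHdr_eq]
        rw [Bool.and_eq_false_iff]
        right
        simpa using hk.2
      rw [show pvOk (l :: ls) = ls.all (fun x => !pvIsSkipHdr x) from by simp [pvOk, hk]]
      rw [pvAll_false_iff]
      constructor
      · rintro ⟨j, hj, hsk⟩
        exact ⟨j + 1, by simpa using hj, by simpa using hsk, 0, by omega, by simpa using hk⟩
      · rintro ⟨j, hj, hsk, i, hij, _⟩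
        cases j with
        | zero => simp [hskl] at hsk
        | succ j' =>
          exact ⟨j', by simpa using hj, by simpa using hsk⟩
    · have hk' : pvIsKeptHdr l = false := by simpa using hk
      rw [show pvOk (l :: ls) = pvOk ls from by simp [pvOk, hk']]
      rw [IH]
      constructor
      · rintro ⟨j, hj, hsk, i, hij, hkp⟩
        exact ⟨j + 1, by simpa using hj, by simpa using hsk, i + 1, by omega, by simpa using hkp⟩
      · rintro ⟨j, hj, hsk, i, hij, hkp⟩
        cases i with
        | zero => simp [hk'] at hkp
        | succ i' =>
          cases j with
          | zero => omega
          | succ j' =>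
            exact ⟨j', by simpa using hj, by simpa using hsk, i', by omega, by simpa using hkp⟩

lemma pvD_iff (c : String) : D_extract_webgpu_features c ↔
    pvOk (PySem.Chars.splitOn c.toList "\n".toList) = false := by
  rw [pvOk_false_iff]
  unfold D_extract_webgpu_features
  constructor
  · rintro ⟨j, hj, hh2, hsk, i, hij, hh1, hnk⟩
    exact ⟨j, hj, (pvSkipPropIff _).mp ⟨hh2, hsk⟩, i, hij, (pvKeptPropIff _).mp ⟨hh1, hnk⟩⟩
  · rintro ⟨j, hj, hskp, i, hij, hkp⟩
    obtain ⟨hh2, hsk⟩ := (pvSkipPropIff _).mpr hskp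
    obtain ⟨hh1, hnk⟩ := (pvKeptPropIff _).mpr hkp
    exact ⟨j, hj, hh2, hsk, i, hij, hh1, hnk⟩

lemma pvGroupF_fuel : ∀ (n m : ℕ) (lines : List (List Char)), lines.length ≤ n → lines.length ≤ m →
    pvGroupF n lines = pvGroupF m lines := by
  intro n
  induction n with
  | zero =>
    intro m lines h1 _
    have : lines = [] := by cases lines <;> simp_all
    subst this; cases m <;> rfl
  | succ n IH =>
    intro m lines h1 h2
    cases lines with
    | nil => cases m <;> rfl
    | cons l ls =>
      cases m with
      | zero => simp at h2
      | succ m =>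
        simp only [List.length_cons, Nat.succ_le_succ_iff] at h1 h2
        simp only [pvGroupF]
        by_cases hh : PySem.Chars.startswith l "## ".toList = true
        · simp only [hh, if_true]
          rw [IH m _ (le_trans (List.length_dropWhile_le _ _) h1)
                (le_trans (List.length_dropWhile_le _ _) h2)]
        · simp only [hh, if_false, Bool.false_eq_true]
          exact IH m ls h1 h2

lemma pvGroup_cons (l : List Char) (ls : List (List Char)) :
    pvGroup (l :: ls) = if PySem.Chars.startswith l "## ".toList then
      (l, ls.takeWhile pvNotHdr) :: pvGroup (ls.dropWhile pvNotHdr)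
    else pvGroup ls := by
  show pvGroupF (ls.length + 1) (l :: ls) = _
  simp only [pvGroupF]
  by_cases hh : PySem.Chars.startswith l "## ".toList = true
  · simp only [hh, if_true, pvGroup]
    rw [pvGroupF_fuel ls.length (ls.dropWhile pvNotHdr).length _ (List.length_dropWhile_le _ _) le_rfl]
  · simp only [hh, pvGroup, Bool.false_eq_true, if_false]

lemma pvFoldA_eq (lines : List (List Char)) : ∀ (F cur : List (List Char)) (inf : Bool),
    (inf = true → cur ≠ []) →
    pvFinal (lines.foldl pvStepA (F, cur, inf)) = F ++ pvRunA (if inf then some cur else none) lines := by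
  induction lines with
  | nil =>
    intro F cur inf hinv
    cases inf
    · simp [pvFinal, pvRunA]
    · cases cur with
      | nil => exact absurd rfl (hinv rfl)
      | cons a as => simp [pvFinal, pvRunA]
  | cons l ls IH =>
    intro F cur inf hinv
    simp only [List.foldl_cons]
    by_cases hh : PySem.Chars.startswith l ['#', '#', ' '] = true
    · by_cases hs : ∃ x ∈ pvSkips, PySem.Chars.isIn x l = true
      · have hstep : pvStepA (F, cur, inf) l = (F, [], false) := by simp [pvStepA, hh, hs]
        rw [hstep, IH F [] false (by simp)]
        cases inf <;> simp [pvRunA, hh, hs]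
      · cases inf
        · have hstep : pvStepA (F, cur, false) l =
              (F, ["### ".toList ++ PySem.Chars.slice l (some 3) none], true) := by
            simp [pvStepA, hh, hs]
          rw [hstep, IH _ _ true (by simp)]
          simp [pvRunA, hh, hs]
        · have hcur := hinv rfl
          have hstep : pvStepA (F, cur, true) l =
              (F ++ [PySem.Chars.join "\n".toList cur],
               ["### ".toList ++ PySem.Chars.slice l (some 3) none], true) := by
            cases cur with
            | nil => exact absurd rfl hcur
            | cons a as => simp [pvStepA, hh, hs]
          rw [hstep, IH _ _ true (by simp)]
          simp [pvRunA, hh, hs]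
    · cases inf
      · have hstep : pvStepA (F, cur, false) l = (F, cur, false) := by
          simp [pvStepA, hh]
        rw [hstep, IH F cur false hinv]
        simp [pvRunA, hh]
      · have hstep : pvStepA (F, cur, true) l = (F, cur ++ [pvDemote l], true) := by
          by_cases h3 : PySem.Chars.startswith l ['#', '#', '#', ' '] = true
          · simp [pvStepA, pvDemote, hh, h3]
          · simp [pvStepA, pvDemote, hh, h3]
        rw [hstep, IH F _ true (by simp)]
        simp [pvRunA, hh]

lemma pvRunA_none_nohdr (body : List (List Char)) (rest : List (List Char))
    (h : ∀ x ∈ body, pvNotHdr x = true) :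
    pvRunA none (body ++ rest) = pvRunA none rest := by
  induction body with
  | nil => rfl
  | cons x xs IH =>
    have hx : PySem.Chars.startswith x "## ".toList = false := by
      have := h x (by simp)
      simpa [pvNotHdr] using this
    simp only [List.cons_append, pvRunA, hx]
    exact IH (fun y hy => h y (by simp [hy]))

lemma pvOk_append (body : List (List Char)) (rest : List (List Char))
    (h : ∀ x ∈ body, pvNotHdr x = true) :
    pvOk (body ++ rest) = pvOk rest := by
  induction body with
  | nil => rfl
  | cons x xs IH =>
    have hx : PySem.Chars.startswith x "## ".toList = false := by
      have := h x (by simp)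
      simpa [pvNotHdr] using this
    simp only [List.cons_append, pvOk, pvIsKeptHdr_eq, hx, Bool.false_and, Bool.false_eq_true,
      if_false]
    exact IH (fun y hy => h y (by simp [hy]))

lemma pvMain : ∀ (n : ℕ) (lines : List (List Char)), lines.length ≤ n →
    (pvOk lines = true → pvRunA none lines = pvSections lines) ∧
    (∀ c : List (List Char), lines.all (fun x => !pvIsSkipHdr x) = true →
      pvRunA (some c) lines =
        PySem.Chars.join "\n".toList (c ++ (lines.takeWhile pvNotHdr).map pvDemote) ::
          pvSections (lines.dropWhile pvNotHdr)) := by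
  intro n
  induction n with
  | zero =>
    intro lines hlen
    cases lines with
    | nil =>
      exact ⟨fun _ => rfl, fun c _ => by simp [pvRunA, pvSections, pvGroup, pvGroupF]⟩
    | cons l ls => simp at hlen
  | succ n IHn =>
    intro lines hlen
    cases lines with
    | nil =>
      exact ⟨fun _ => rfl, fun c _ => by simp [pvRunA, pvSections, pvGroup, pvGroupF]⟩
    | cons l ls =>
      have hls : ls.length ≤ n := by simpa using hlen
      have hdrop : (ls.dropWhile pvNotHdr).length ≤ n :=
        le_trans (List.length_dropWhile_le _ _) hls
      have htw : ∀ x ∈ ls.takeWhile pvNotHdr, pvNotHdr x = true :=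
        fun x hx => List.mem_takeWhile_imp hx
      constructor
      · intro hok
        by_cases hh : PySem.Chars.startswith l ['#', '#', ' '] = true
        · by_cases hs : ∃ x ∈ pvSkips, PySem.Chars.isIn x l = true
          · have hkept : pvIsKeptHdr l = false := by simp [pvIsKeptHdr_eq, hs]
            have hok' : pvOk ls = true := by simpa [pvOk, hkept] using hok
            have hokd : pvOk (ls.dropWhile pvNotHdr) = true := by
              rw [← pvOk_append _ _ htw, List.takeWhile_append_dropWhile]
              exact hok'
            calc pvRunA none (l :: ls) = pvRunA none ls := by simp [pvRunA, hh, hs]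
              _ = pvRunA none (ls.takeWhile pvNotHdr ++ ls.dropWhile pvNotHdr) := by
                    rw [List.takeWhile_append_dropWhile]
              _ = pvRunA none (ls.dropWhile pvNotHdr) := pvRunA_none_nohdr _ _ htw
              _ = pvSections (ls.dropWhile pvNotHdr) := (IHn _ hdrop).1 hokd
              _ = pvSections (l :: ls) := by simp [pvSections, pvGroup_cons, hh, hs]
          · have hkept : pvIsKeptHdr l = true := by
              simp only [pvIsKeptHdr_eq]
              rw [Bool.and_eq_true]
              refine ⟨by simpa using hh, ?_⟩
              rw [Bool.not_eq_true', List.any_eq_false]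
              intro x hx
              by_contra hc
              exact hs ⟨x, hx, by simpa using hc⟩
            have hall : ls.all (fun x => !pvIsSkipHdr x) = true := by
              simpa [pvOk, hkept] using hok
            have h2 := (IHn ls hls).2 ["### ".toList ++ PySem.Chars.slice l (some 3) none] hall
            calc pvRunA none (l :: ls)
                = pvRunA (some ["### ".toList ++ PySem.Chars.slice l (some 3) none]) ls := by
                    simp [pvRunA, hh, hs]
              _ = pvSections (l :: ls) := by
                    rw [h2]; simp [pvSections, pvGroup_cons, hh, hs, pvSec]
        · have hkept : pvIsKeptHdr l = false := by simp [pvIsKeptHdr_eq, hh]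
          have hok' : pvOk ls = true := by simpa [pvOk, hkept] using hok
          have h1 := (IHn ls hls).1 hok'
          calc pvRunA none (l :: ls) = pvRunA none ls := by simp [pvRunA, hh]
            _ = pvSections ls := h1
            _ = pvSections (l :: ls) := by simp [pvSections, pvGroup_cons, hh]
      · intro c hall
        have hallls : ls.all (fun x => !pvIsSkipHdr x) = true := by
          simp only [List.all_cons, Bool.and_eq_true] at hall
          exact hall.2
        by_cases hh : PySem.Chars.startswith l ['#', '#', ' '] = true
        · have hs : ¬∃ x ∈ pvSkips, PySem.Chars.isIn x l = true := by
            have hl : (!pvIsSkipHdr l) = true := by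
              simp only [List.all_cons, Bool.and_eq_true] at hall
              exact hall.1
            intro hex
            have hany : (pvSkips.any fun skip => PySem.Chars.isIn skip l) = true := by
              simpa using hex
            simp [pvIsSkipHdr_eq, hh, hany] at hl
          have h2 := (IHn ls hls).2 ["### ".toList ++ PySem.Chars.slice l (some 3) none] hallls
          have hnh : pvNotHdr l = false := by simp [pvNotHdr, hh]
          calc pvRunA (some c) (l :: ls)
              = PySem.Chars.join "\n".toList c ::
                  pvRunA (some ["### ".toList ++ PySem.Chars.slice l (some 3) none]) ls := by
                simp [pvRunA, hh, hs]
            _ = PySem.Chars.join "\n".toList (c ++ ((l :: ls).takeWhile pvNotHdr).map pvDemote) ::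
                  pvSections ((l :: ls).dropWhile pvNotHdr) := by
                rw [h2]
                simp [hnh, pvSections, pvGroup_cons, hh, hs, pvSec]
        · have hnh : pvNotHdr l = true := by simp [pvNotHdr, hh]
          have h2 := (IHn ls hls).2 (c ++ [pvDemote l]) hallls
          calc pvRunA (some c) (l :: ls) = pvRunA (some (c ++ [pvDemote l])) ls := by
                simp [pvRunA, hh]
            _ = PySem.Chars.join "\n".toList (c ++ ((l :: ls).takeWhile pvNotHdr).map pvDemote) ::
                  pvSections ((l :: ls).dropWhile pvNotHdr) := by
                rw [h2]
                simp [hnh]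

lemma pvMemJoin {a : List Char} (t : List (List Char)) (h : '#' ∈ a) :
    '#' ∈ PySem.Chars.join "\n".toList (a :: t) := by
  cases t with
  | nil => simpa [PySem.Chars.join_singleton] using h
  | cons b r =>
    simp only [PySem.Chars.join_cons_cons, List.mem_append]
    exact Or.inl (Or.inl h)

lemma pvRunA_mem : ∀ (lines : List (List Char)) (p : Option (List (List Char))),
    (∀ c, p = some c → ∃ a t, c = a :: t ∧ '#' ∈ a) →
    ∀ f ∈ pvRunA p lines, '#' ∈ f := by
  intro lines
  induction lines with
  | nil =>
    intro p hp f hf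
    cases p with
    | none => simp [pvRunA] at hf
    | some c =>
      obtain ⟨a, t, rfl, ha⟩ := hp c rfl
      simp only [pvRunA, List.mem_singleton] at hf
      rw [hf]; exact pvMemJoin t ha
  | cons l ls IH =>
    intro p hp f hf
    cases p with
    | none =>
      by_cases hh : PySem.Chars.startswith l ['#', '#', ' '] = true
      · by_cases hs : ∃ x ∈ pvSkips, PySem.Chars.isIn x l = true
        · simp only [pvRunA] at hf
          rw [if_pos (by simpa using hh), if_pos (by simpa using hs)] at hf
          exact IH none (by simp) f hf
        · simp only [pvRunA] at hf
          rw [if_pos (by simpa using hh), if_neg (by simpa using hs)] at hf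
          simp only [List.nil_append] at hf
          refine IH _ ?_ f hf
          intro c hc
          injection hc with hc
          exact ⟨_, [], hc.symm, by simp⟩
      · simp only [pvRunA] at hf
        rw [if_neg (by simpa using hh)] at hf
        exact IH none (by simp) f hf
    | some c =>
      obtain ⟨a, t, rfl, ha⟩ := hp c rfl
      by_cases hh : PySem.Chars.startswith l ['#', '#', ' '] = true
      · by_cases hs : ∃ x ∈ pvSkips, PySem.Chars.isIn x l = true
        · simp only [pvRunA] at hf
          rw [if_pos (by simpa using hh), if_pos (by simpa using hs)] at hf
          exact IH none (by simp) f hf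
        · simp only [pvRunA] at hf
          rw [if_pos (by simpa using hh), if_neg (by simpa using hs)] at hf
          rcases List.mem_append.mp hf with h1 | h2
          · simp only [List.mem_singleton] at h1
            rw [h1]; exact pvMemJoin t ha
          · refine IH _ ?_ f h2
            intro c' hc'
            injection hc' with hc'
            exact ⟨_, [], hc'.symm, by simp⟩
      · simp only [pvRunA] at hf
        rw [if_neg (by simpa using hh)] at hf
        refine IH _ ?_ f hf
        intro c' hc'
        injection hc' with hc'
        exact ⟨a, t ++ [pvDemote l], by simp [← hc'], ha⟩

lemma pvSections_mem : ∀ (lines : List (List Char)) (f : List Char), f ∈ pvSections lines → '#' ∈ f := by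
  intro lines f hf
  obtain ⟨⟨h, b⟩, _, heq⟩ := List.mem_filterMap.mp hf
  by_cases hc : (pvSkips.any fun skip => PySem.Chars.isIn skip h) = true
  · rw [if_pos hc] at heq; exact absurd heq (by simp)
  · rw [if_neg hc] at heq
    injection heq with heq
    rw [← heq]
    exact pvMemJoin _ (by simp)

lemma pvStrip_ne (s : List Char) (h : '#' ∈ s) : PySem.Chars.strip s ≠ [] := by
  intro he
  have h1 : '#' ∈ PySem.Chars.lstrip s := by
    show '#' ∈ List.dropWhile PySem.Chars.isspace s
    by_cases hm : '#' ∈ List.takeWhile PySem.Chars.isspace s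
    · have := List.mem_takeWhile_imp hm
      exact absurd this (by decide)
    · have hm2 : '#' ∈ List.takeWhile PySem.Chars.isspace s ++ List.dropWhile PySem.Chars.isspace s := by
        rw [List.takeWhile_append_dropWhile]; exact h
      rcases List.mem_append.mp hm2 with h' | h'
      · exact absurd h' hm
      · exact h'
  unfold PySem.Chars.strip PySem.Chars.rstrip at he
  have h2 : List.dropWhile PySem.Chars.isspace (PySem.Chars.lstrip s).reverse = [] := by
    simpa using he
  have h3 := List.dropWhile_eq_nil_iff.mp h2 '#' (by simpa using h1)
  exact absurd h3 (by decide)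

lemma pvFilterLen (xs : List (List Char)) (h : ∀ f ∈ xs, '#' ∈ f) :
    ((xs.filterMap (fun f =>
        if (PySem.Chars.strip f).isEmpty then none else some (PySem.Chars.strip f))).map
      String.ofList).length = xs.length := by
  induction xs with
  | nil => simp
  | cons a as IH =>
    have hne : PySem.Chars.strip a ≠ [] := pvStrip_ne a (h a (by simp))
    have hcond : (PySem.Chars.strip a).isEmpty = false := by
      simpa [List.isEmpty_iff] using hne
    have hrest := IH (fun f hf => h f (by simp [hf]))
    simp only [List.filterMap_cons, hcond, Bool.false_eq_true, if_false, List.map_cons,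
      List.length_cons, hrest]

lemma pvLen : ∀ (n : ℕ) (lines : List (List Char)), lines.length ≤ n →
    ((pvRunA none lines).length ≤ (pvSections lines).length) ∧
    (∀ c, (pvRunA (some c) lines).length ≤ 1 + (pvSections (lines.dropWhile pvNotHdr)).length) ∧
    (pvOk lines = false → (pvRunA none lines).length < (pvSections lines).length) ∧
    (∀ c, lines.all (fun x => !pvIsSkipHdr x) = false →
      (pvRunA (some c) lines).length < 1 + (pvSections (lines.dropWhile pvNotHdr)).length) := by
  intro n
  induction n with
  | zero =>
    intro lines hlen
    have : lines = [] := by cases lines <;> simp_all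
    subst this
    exact ⟨le_rfl, fun c => by simp [pvRunA, pvSections, pvGroup, pvGroupF],
      fun h => by simp [pvOk] at h, fun c h => by simp at h⟩
  | succ n IHn =>
    intro lines hlen
    cases lines with
    | nil =>
      exact ⟨le_rfl, fun c => by simp [pvRunA, pvSections, pvGroup, pvGroupF],
        fun h => by simp [pvOk] at h, fun c h => by simp at h⟩
    | cons l ls =>
      have hls : ls.length ≤ n := by simpa using hlen
      have hdropn : (ls.dropWhile pvNotHdr).length ≤ n :=
        le_trans (List.length_dropWhile_le _ _) hls
      have htw : ∀ x ∈ ls.takeWhile pvNotHdr, pvNotHdr x = true :=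
        fun x hx => List.mem_takeWhile_imp hx
      have hrunnone : pvRunA none ls = pvRunA none (ls.dropWhile pvNotHdr) := by
        conv_lhs => rw [← List.takeWhile_append_dropWhile (p := pvNotHdr) (l := ls)]
        exact pvRunA_none_nohdr _ _ htw
      have hokdrop : pvOk ls = pvOk (ls.dropWhile pvNotHdr) := by
        conv_lhs => rw [← List.takeWhile_append_dropWhile (p := pvNotHdr) (l := ls)]
        exact pvOk_append _ _ htw
      by_cases hh : PySem.Chars.startswith l ['#', '#', ' '] = true
      · have hnh : pvNotHdr l = false := by simp [pvNotHdr, hh]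
        have hdropc : (l :: ls).dropWhile pvNotHdr = l :: ls := by simp [List.dropWhile_cons, hnh]
        by_cases hs : ∃ x ∈ pvSkips, PySem.Chars.isIn x l = true
        · have hsecs : pvSections (l :: ls) = pvSections (ls.dropWhile pvNotHdr) := by
            simp [pvSections, pvGroup_cons, hh, hs]
          have hrun : pvRunA none (l :: ls) = pvRunA none ls := by simp [pvRunA, hh, hs]
          have hruns : ∀ c, pvRunA (some c) (l :: ls) = pvRunA none ls := by
            intro c; simp [pvRunA, hh, hs]
          have hskipl : pvIsSkipHdr l = true := by
            simp [pvIsSkipHdr, Bool.and_eq_true]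
            exact ⟨by simpa using hh, by simpa using hs⟩
          refine ⟨?_, ?_, ?_, ?_⟩
          · rw [hrun, hrunnone, hsecs]; exact (IHn _ hdropn).1
          · intro c; rw [hruns c, hrunnone, hdropc, hsecs]
            exact le_trans (IHn _ hdropn).1 (by omega)
          · intro hok
            have hokd : pvOk (ls.dropWhile pvNotHdr) = false := by
              rw [← hokdrop]
              simpa [pvOk, (by simp [pvIsKeptHdr, Bool.and_eq_true]; intro _; simpa using hs :
                pvIsKeptHdr l = false)] using hok
            rw [hrun, hrunnone, hsecs]
            exact (IHn _ hdropn).2.2.1 hokd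
          · intro c _
            rw [hruns c, hrunnone, hdropc, hsecs]
            exact lt_of_le_of_lt (IHn _ hdropn).1 (by omega)
        · have hsecs : pvSections (l :: ls) =
              pvSec l (ls.takeWhile pvNotHdr) :: pvSections (ls.dropWhile pvNotHdr) := by
            simp [pvSections, pvGroup_cons, hh, hs]
          have hrun : pvRunA none (l :: ls) =
              pvRunA (some ["### ".toList ++ PySem.Chars.slice l (some 3) none]) ls := by
            simp [pvRunA, hh, hs]
          have hruns : ∀ c, pvRunA (some c) (l :: ls) =
              PySem.Chars.join "\n".toList c ::
                pvRunA (some ["### ".toList ++ PySem.Chars.slice l (some 3) none]) ls := by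
            intro c; simp [pvRunA, hh, hs]
          have hkeptl : pvIsKeptHdr l = true := by
            simp only [pvIsKeptHdr, Bool.and_eq_true]
            refine ⟨by simpa using hh, ?_⟩
            rw [Bool.not_eq_true', List.any_eq_false]
            intro x hx
            by_contra hc
            exact hs ⟨x, hx, by simpa using hc⟩
          have hskipl : pvIsSkipHdr l = false := by
            simp only [pvIsSkipHdr]
            rw [Bool.and_eq_false_iff]
            right
            rw [List.any_eq_false]
            intro x hx
            by_contra hc
            exact hs ⟨x, hx, by simpa using hc⟩
          refine ⟨?_, ?_, ?_, ?_⟩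
          · rw [hrun, hsecs]
            have h := (IHn ls hls).2.1 ["### ".toList ++ PySem.Chars.slice l (some 3) none]
            simp only [List.length_cons]
            omega
          · intro c
            rw [hruns c, hdropc, hsecs]
            have h := (IHn ls hls).2.1 ["### ".toList ++ PySem.Chars.slice l (some 3) none]
            simp only [List.length_cons]
            omega
          · intro hok
            have hallf : ls.all (fun x => !pvIsSkipHdr x) = false := by
              simpa [pvOk, hkeptl] using hok
            rw [hrun, hsecs]
            have h := (IHn ls hls).2.2.2 ["### ".toList ++ PySem.Chars.slice l (some 3) none] hallf
            simp only [List.length_cons]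
            omega
          · intro c hall
            have hallf : ls.all (fun x => !pvIsSkipHdr x) = false := by
              simpa [List.all_cons, hskipl] using hall
            rw [hruns c, hdropc, hsecs]
            have h := (IHn ls hls).2.2.2 ["### ".toList ++ PySem.Chars.slice l (some 3) none] hallf
            simp only [List.length_cons]
            omega
      · have hnh : pvNotHdr l = true := by simp [pvNotHdr, hh]
        have hdropc : (l :: ls).dropWhile pvNotHdr = ls.dropWhile pvNotHdr := by
          simp [List.dropWhile_cons, hnh]
        have hsecs : pvSections (l :: ls) = pvSections ls := by
          simp [pvSections, pvGroup_cons, hh]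
        have hkeptl : pvIsKeptHdr l = false := by
          simp [pvIsKeptHdr, by simpa using hh]
        have hskipl : pvIsSkipHdr l = false := by
          simp [pvIsSkipHdr, by simpa using hh]
        have hrun : pvRunA none (l :: ls) = pvRunA none ls := by simp [pvRunA, hh]
        have hruns : ∀ c, pvRunA (some c) (l :: ls) = pvRunA (some (c ++ [pvDemote l])) ls := by
          intro c; simp [pvRunA, hh]
        refine ⟨?_, ?_, ?_, ?_⟩
        · rw [hrun, hsecs]; exact (IHn ls hls).1
        · intro c; rw [hruns c, hdropc]; exact (IHn ls hls).2.1 _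
        · intro hok
          rw [hrun, hsecs]
          exact (IHn ls hls).2.2.1 (by simpa [pvOk, hkeptl] using hok)
        · intro c hall
          rw [hruns c, hdropc]
          exact (IHn ls hls).2.2.2 _ (by simpa [List.all_cons, hskipl] using hall)

-- ===== VERDICT =====
theorem extract_webgpu_features_spec : Claim_unchanged_extract_webgpu_features := by
  intro c _ hnD
  unfold extract_webgpu_features extract_webgpu_features_alt
  have hD : pvOk (PySem.Chars.splitOn c.toList "\n".toList) = true := by
    by_contra h
    have hfalse : pvOk (PySem.Chars.splitOn c.toList "\n".toList) = false := by
      simpa using h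
    exact hnD ((pvD_iff c).mpr hfalse)
  have h1 := pvFoldA_eq (PySem.Chars.splitOn c.toList "\n".toList) [] [] false (by simp)
  have h2 := (pvMain (PySem.Chars.splitOn c.toList "\n".toList).length _ le_rfl).1 hD
  simp only [pvFinal] at h1
  simp only [h1, if_neg (by simp : ¬ (false = true)), List.nil_append, h2]

theorem extract_webgpu_features_changed : Claim_changed_extract_webgpu_features := by
  unfold Claim_changed_extract_webgpu_features; decide

theorem extract_webgpu_features_tight : Claim_exact_extract_webgpu_features := by
  intro c _ hD
  have hok : pvOk (PySem.Chars.splitOn c.toList "\n".toList) = false := (pvD_iff c).mp hD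
  intro heq
  have h1 := pvFoldA_eq (PySem.Chars.splitOn c.toList "\n".toList) [] [] false (by simp)
  have hA : extract_webgpu_features c =
      ((pvRunA none (PySem.Chars.splitOn c.toList "\n".toList)).filterMap (fun f =>
        if (PySem.Chars.strip f).isEmpty then none else some (PySem.Chars.strip f))).map
        String.ofList := by
    unfold extract_webgpu_features
    simp only [pvFinal] at h1
    simp only [h1, if_neg (by simp : ¬ (false = true)), List.nil_append]
  have hB : extract_webgpu_features_alt c =
      ((pvSections (PySem.Chars.splitOn c.toList "\n".toList)).filterMap (fun f =>
        if (PySem.Chars.strip f).isEmpty then none else some (PySem.Chars.strip f))).map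
        String.ofList := rfl
  have lA : (extract_webgpu_features c).length =
      (pvRunA none (PySem.Chars.splitOn c.toList "\n".toList)).length := by
    rw [hA]; exact pvFilterLen _ (pvRunA_mem _ none (by simp))
  have lB : (extract_webgpu_features_alt c).length =
      (pvSections (PySem.Chars.splitOn c.toList "\n".toList)).length := by
    rw [hB]; exact pvFilterLen _ (fun f hf => pvSections_mem _ f hf)
  have hlt := (pvLen (PySem.Chars.splitOn c.toList "\n".toList).length _ le_rfl).2.2.1 hok
  rw [heq, lB] at lA
  omega
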